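-- pv_equiv track=rewrite | github.com/KhoiBui16/28Tech_Code_Online | Python/Source Code Python Contest/Contest_3_HamVaLyThuyetSo/Bai30_ChuSoCuoiCungLonNhat.py | check_max_last_digit
-- ===== SOURCE A (Python) =====
-- def check_max_last_digit(n):
--     check = n % 10
--     while n != 0:
--         digit = n % 10
--         if digit > check:
--             return False
--         n //= 10
--     return True
-- ===== SOURCE B (Python) =====
-- def check_max_last_digit(n):
--     last = n % 10
--     biggest = n % 10
--     while n != 0:
--         d = n % 10
--         if d > biggest:
--             biggest = d
--         n //= 10
--     return last == biggest
-- ===== Notes on version B (the rewrite author's own statement) =====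
-- stated objective: simpler
-- what changed: Instead of A's early-return scan that aborts on the first digit exceeding the last, B accumulates the running maximum of all digits in one full pass and compares it to the last digit after the loop.
-- outside the precondition, e.g. on check_max_last_digit(-12): A returns False, B does not finish within the time limit
import Mathlib
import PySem

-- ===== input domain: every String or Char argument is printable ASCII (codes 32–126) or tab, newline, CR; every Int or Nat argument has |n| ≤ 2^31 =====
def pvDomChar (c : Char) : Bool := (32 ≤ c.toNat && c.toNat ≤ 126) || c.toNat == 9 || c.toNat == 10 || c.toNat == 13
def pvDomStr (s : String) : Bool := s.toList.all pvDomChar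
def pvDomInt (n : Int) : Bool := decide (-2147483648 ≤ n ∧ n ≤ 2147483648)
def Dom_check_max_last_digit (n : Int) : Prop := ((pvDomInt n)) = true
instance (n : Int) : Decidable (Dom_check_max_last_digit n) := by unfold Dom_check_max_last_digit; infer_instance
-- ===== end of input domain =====

-- B replaces A's early-return scan by a full-pass running maximum of the digits compared
-- to the last digit after the loop (objective: simpler decomposition, same cost).
-- Both loops are over Python floor division, so neither program terminates for every
-- negative input; Pre_ restricts to n ≥ 0 (see comment there).

-- ===== PORT A =====
-- A's while-loop, fuel = n.natAbs + 1 (enough iterations for every n ≥ 0; the fuel-0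
-- branch is unreachable inside Pre_, it only makes the definition total).
def pvAGo : Nat → Int → Int → Bool
  | 0, _, _ => false
  | fuel + 1, n, check =>
    if n = 0 then true
    else
      let digit := PySem.Int.mod n 10
      if digit > check then false
      else pvAGo fuel (PySem.Int.floordiv n 10) check

def check_max_last_digit (n : Int) : Bool :=
  pvAGo (n.natAbs + 1) n (PySem.Int.mod n 10)

-- ===== PORT B =====
-- B's while-loop: accumulate the running maximum of the digits.
def pvBGo : Nat → Int → Int → Int
  | 0, _, biggest => biggest
  | fuel + 1, n, biggest =>
    if n = 0 then biggest
    else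
      let d := PySem.Int.mod n 10
      pvBGo fuel (PySem.Int.floordiv n 10) (if d > biggest then d else biggest)

def check_max_last_digit_alt (n : Int) : Bool :=
  let last := PySem.Int.mod n 10
  decide (last = pvBGo (n.natAbs + 1) n last)

-- ===== PRECONDITION & SPEC =====
-- Pre_ excludes negative n: there A's floor-division loop never reaches 0 (it stalls at -1,
-- digit 9), so A diverges when n % 10 == 9 and returns an accidental False otherwise, and
-- B's own loop diverges on every negative n.
def Pre_check_max_last_digit (n : Int) : Prop := 0 ≤ n
instance (n : Int) : Decidable (Pre_check_max_last_digit n) := by unfold Pre_check_max_last_digit; infer_instance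
def pvWitness_check_max_last_digit : Int := (975)

def Spec_check_max_last_digit (n : Int) (out : Bool) : Prop := out = check_max_last_digit_alt n
instance (n : Int) (out : Bool) : Decidable (Spec_check_max_last_digit n out) := by unfold Spec_check_max_last_digit; infer_instance

-- ===== CLAIM (what is proved, stated in full; the proofs are below) =====
def Claim_equal_check_max_last_digit : Prop := ∀ (n : Int), Dom_check_max_last_digit n → Pre_check_max_last_digit n → Spec_check_max_last_digit n (check_max_last_digit n)

-- ===== LEMMAS AND PROOFS =====

-- B's accumulator never decreases.
theorem pvBGo_le (fuel : Nat) : ∀ (n biggest : Int), biggest ≤ pvBGo fuel n biggest := by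
  induction fuel with
  | zero => intro n biggest; simp [pvBGo]
  | succ f ih =>
    intro n biggest
    simp only [pvBGo]
    split
    · exact le_refl _
    · split
      · exact le_trans (le_of_lt (by assumption)) (ih _ _)
      · exact ih _ _

-- core equivalence of the two loops, by induction on fuel
theorem pvGo_eq (fuel : Nat) :
    ∀ (n c : Int), 0 ≤ n → n.natAbs < fuel →
      pvAGo fuel n c = decide (c = pvBGo fuel n c) := by
  induction fuel with
  | zero => intro n c _ h; omega
  | succ f ih =>
    intro n c hn hf
    simp only [pvAGo, pvBGo]
    by_cases h0 : n = 0
    · simp [h0]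
    · have hnpos : 1 ≤ n := by omega
      have hmod : PySem.Int.mod n 10 = n % 10 := PySem.Int.mod_eq_emod_of_pos (by omega)
      have hdiv : PySem.Int.floordiv n 10 = n / 10 := PySem.Int.floordiv_eq_ediv_of_pos (by omega)
      have hq0 : 0 ≤ n / 10 := by omega
      have hqlt : (n / 10).natAbs < f := by omega
      by_cases hd : PySem.Int.mod n 10 > c
      · -- A returns false; B's max strictly exceeds c, so comparison fails
        have hge : PySem.Int.mod n 10 ≤ pvBGo f (PySem.Int.floordiv n 10) (PySem.Int.mod n 10) :=
          pvBGo_le _ _ _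
        have hne : c ≠ pvBGo f (PySem.Int.floordiv n 10) (PySem.Int.mod n 10) := by
          intro he; omega
        simp only [if_neg h0, if_pos hd]
        exact (decide_eq_false hne).symm
      · simp only [if_neg h0, if_neg hd]
        exact ih (PySem.Int.floordiv n 10) c (hdiv ▸ hq0) (hdiv ▸ hqlt)

-- ===== VERDICT (by name: the statement is the Claim_ definition above) =====
theorem check_max_last_digit_spec : Claim_equal_check_max_last_digit := by
  intro n _ hpre
  unfold Spec_check_max_last_digit check_max_last_digit check_max_last_digit_alt
  exact pvGo_eq (n.natAbs + 1) n (PySem.Int.mod n 10) hpre (by omega)
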